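-- pv_equiv track=rewrite | github.com/alekh08/Hackerrank | Waiter.py | waiter
-- ===== SOURCE A (Python) =====
-- def waiter(number, q):
--
--     def generate_primes(n):
--         primes = []
--         num = 2
--         while len(primes) < n:
--             for p in primes:
--                 if num % p == 0:
--                     break
--             else:
--                 primes.append(num)
--             num += 1
--         return primes
--     primes = generate_primes(q)
--     answers = []
--     A = number[:]  # Top of stack is the end of the list
--
--     for i in range(q):
--         B = []
--         next_A = []
--         while A:
--             plate = A.pop()
--             if plate % primes[i] == 0:
--                 B.append(plate)
--             else:
--                 next_A.append(plate)
--         while B: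
--             answers.append(B.pop())
--         A = next_A
--
--     while A:
--         answers.append(A.pop())
--
--     return answers
-- ===== SOURCE B (Python) =====
-- def waiter(number, q):
--
--     def generate_primes(n):
--         primes = []
--         num = 2
--         while len(primes) < n:
--             for p in primes:
--                 if num % p == 0:
--                     break
--             else:
--                 primes.append(num)
--             num += 1
--         return primes
--
--     primes = generate_primes(q)
--     # One pass over the plates: each plate goes to the bucket of the first
--     # prime (in order) that divides it, or to `rest` if none does.
--     buckets = [[] for _ in primes]
--     rest = []
--     for plate in number:
--         for k, p in enumerate(primes):
--             if plate % p == 0: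
--                 buckets[k].append(plate)
--                 break
--         else:
--             rest.append(plate)
--     # Stack flips orientation each round: even-indexed buckets come out in
--     # original order, odd-indexed ones reversed; the leftover pile likewise.
--     out = []
--     for k, b in enumerate(buckets):
--         out += b if k % 2 == 0 else b[::-1]
--     out += rest if len(primes) % 2 == 1 else rest[::-1]
--     return out
-- ===== Notes on version B (the rewrite author's own statement) =====
-- stated objective: alternative
-- what changed: A simulates the waiter's stack with q pop-everything passes (each pass reversing the remaining pile and double-reversing the matched plates); B makes a single classifying pass that drops each plate into the bucket of the first prime dividing it (or a rest pile), then concatenates the buckets, reversing the odd-indexed ones and applying the same parity rule to the rest pile.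
import Mathlib
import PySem

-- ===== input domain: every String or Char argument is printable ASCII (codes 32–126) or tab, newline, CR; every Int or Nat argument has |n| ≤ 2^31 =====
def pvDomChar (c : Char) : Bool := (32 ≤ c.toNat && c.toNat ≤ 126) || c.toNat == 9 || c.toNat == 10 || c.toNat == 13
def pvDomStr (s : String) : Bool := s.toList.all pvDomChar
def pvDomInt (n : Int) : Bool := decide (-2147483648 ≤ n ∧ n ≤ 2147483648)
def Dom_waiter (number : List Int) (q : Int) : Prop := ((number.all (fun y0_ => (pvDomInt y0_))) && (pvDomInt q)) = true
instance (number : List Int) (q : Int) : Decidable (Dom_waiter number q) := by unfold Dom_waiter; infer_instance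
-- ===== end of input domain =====

-- B replaces A's q stack-reversing passes over the plates by a single classifying
-- pass into per-prime buckets, emitted with a parity rule (objective: alternative).

-- ===== PORT A =====
-- generate_primes, shared verbatim by A and B (both Python files contain the identical helper).
-- The while loop is ported with a fuel bound n^2+4 ≥ the largest candidate examined
-- (the n-th prime is below n^2+4), so the fuel never runs out.
def genPrimesLoop : Nat → List Int → Int → Int → List Int
  | 0, primes, _, _ => primes
  | fuel+1, primes, num, n =>
    if (primes.length : Int) < n then
      -- for p in primes: if num % p == 0: break / else: primes.append(num)
      genPrimesLoop fuel
        (if primes.any (fun p => PySem.Int.mod num p == 0) then primes else primes ++ [num])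
        (num + 1) n
    else primes

def genPrimes (n : Int) : List Int := genPrimesLoop (n.toNat * n.toNat + 4) [] 2 n

-- inner "while A: plate = A.pop(); …" body (one pop)
def waiterInner (p : Int) (bn : List Int × List Int) (plate : Int) : List Int × List Int :=
  if PySem.Int.mod plate p == 0 then (bn.1 ++ [plate], bn.2) else (bn.1, bn.2 ++ [plate])

-- one round of the for-loop: drain stack A (pop order = reverse order), then
-- "while B: answers.append(B.pop())" appends B reversed, and A = next_A
def waiterRound (st : List Int × List Int) (p : Int) : List Int × List Int :=
  let bn := st.1.reverse.foldl (waiterInner p) ([], [])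
  (bn.2, st.2 ++ bn.1.reverse)

-- "for i in range(q): … primes[i]" — generate_primes(q) returns exactly the first
-- q primes, so the loop visits the list `primes` in order; ported as a fold over it.
def waiter (number : List Int) (q : Int) : List Int :=
  let primes := genPrimes q
  let fin := primes.foldl waiterRound (number, [])
  -- "while A: answers.append(A.pop())"
  fin.2 ++ fin.1.reverse

-- ===== PORT B =====
-- one classifying step: plate goes to the bucket of the first dividing prime, else to rest
def altClassify (primes : List Int) (st : List (List Int) × List Int) (plate : Int) :
    List (List Int) × List Int :=
  match primes.findIdx? (fun p => PySem.Int.mod plate p == 0) with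
  | some k => (st.1.modify k (· ++ [plate]), st.2)
  | none => (st.1, st.2 ++ [plate])

-- "for k, b in enumerate(buckets): out += b if k % 2 == 0 else b[::-1]"
def altAssemble (out : List Int) (bk : List Int × Nat) : List Int :=
  out ++ (if bk.2 % 2 == 0 then bk.1 else bk.1.reverse)

def waiter_alt (number : List Int) (q : Int) : List Int :=
  let primes := genPrimes q
  let br := number.foldl (altClassify primes) (primes.map (fun _ => ([] : List Int)), [])
  let out := (br.1.zipIdx).foldl altAssemble []
  out ++ (if primes.length % 2 == 1 then br.2 else br.2.reverse)

-- ===== PRECONDITION & SPEC =====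
def Spec_waiter (number : List Int) (q : Int) (out : List Int) : Prop := out = waiter_alt number q
instance (number : List Int) (q : Int) (out : List Int) : Decidable (Spec_waiter number q out) := by unfold Spec_waiter; infer_instance

-- ===== CLAIM (what is proved, stated in full; the proofs are below) =====
def Claim_equal_waiter : Prop := ∀ (number : List Int) (q : Int), Dom_waiter number q → Spec_waiter number q (waiter number q)

-- ===== LEMMAS AND PROOFS =====

-- divisibility test used by both programs
def dv (p x : Int) : Bool := PySem.Int.mod x p == 0

-- plates surviving all primes of ps, in original order
def remF (ps A : List Int) : List Int := A.filter (fun x => ps.all (fun p => !dv p x))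

def orient (b : Bool) (l : List Int) : List Int := if b then l.reverse else l

-- the emitted answer prefix, parity-aware, in terms of the ORIGINAL plate order
def emitP : List Int → List Int → Bool → List Int
  | [], _, _ => []
  | p::ps, A, b =>
      (if b then (A.filter (dv p)).reverse else A.filter (dv p)) ++
      emitP ps (A.filter (fun x => !dv p x)) (!b)

-- B's buckets, recursively
def bkts : List Int → List Int → List (List Int)
  | [], _ => []
  | p::ps, A => A.filter (dv p) :: bkts ps (A.filter (fun x => !dv p x))

lemma pop_acc (p : Int) (L : List Int) : ∀ b0 n0,
    L.foldl (waiterInner p) (b0, n0) = (b0 ++ L.filter (dv p), n0 ++ L.filter (fun x => !dv p x)) := by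
  induction L with
  | nil => simp
  | cons x L ih =>
      intro b0 n0
      by_cases h : PySem.Int.mod x p = 0
      · simp [waiterInner, dv, h, ih]
      · simp [waiterInner, dv, h, ih]

lemma wround_eq (p : Int) (A ans : List Int) :
    waiterRound (A, ans) p =
      ((A.filter (fun x => !dv p x)).reverse, ans ++ A.filter (dv p)) := by
  simp only [waiterRound, pop_acc]
  simp [List.filter_reverse]

lemma orient_reverse (b : Bool) (l : List Int) : (orient b l).reverse = orient (!b) l := by
  cases b <;> simp [orient]

lemma orient_filter (b : Bool) (f : Int → Bool) (l : List Int) :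
    (orient b l).filter f = orient b (l.filter f) := by
  cases b <;> simp [orient, List.filter_reverse]

lemma roundsA (ps : List Int) : ∀ (A ans : List Int) (b : Bool),
    ps.foldl waiterRound (orient b A, ans) =
      (orient (b ^^ decide (ps.length % 2 = 1)) (remF ps A), ans ++ emitP ps A b) := by
  induction ps with
  | nil => intro A ans b; simp [remF, emitP]
  | cons p ps ih =>
      intro A ans b
      have h1 : waiterRound (orient b A, ans) p =
          (orient (!b) (A.filter (fun x => !dv p x)), ans ++ orient b (A.filter (dv p))) := by
        rw [wround_eq, orient_filter, orient_filter, orient_reverse]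
      rw [List.foldl_cons, h1, ih]
      simp only [Prod.mk.injEq]
      constructor
      · congr 1
        · cases b <;> simp [Nat.succ_mod_two_eq_one_iff] <;>
            rcases Nat.mod_two_eq_zero_or_one ps.length with h | h <;> simp [h]
        · simp [remF, List.filter_filter, List.all_cons, Bool.and_comm]
      · simp [emitP]
        cases b <;> simp [orient]

-- B: the classifying fold, closed form
lemma classify_acc (ps : List Int) (A : List Int) : ∀ (bs0 : List (List Int)) (r0 : List Int),
    bs0.length = ps.length →
    A.foldl (altClassify ps) (bs0, r0) =
      (List.zipWith (· ++ ·) bs0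
        ((List.range ps.length).map
          (fun k => A.filter (fun x => ps.findIdx? (fun p => dv p x) == some k))),
       r0 ++ remF ps A) := by
  induction A with
  | nil =>
      intro bs0 r0 hlen
      simp [remF]
      apply List.ext_getElem
      · simp [hlen]
      · intro i h1 h2
        simp
  | cons plate A ih =>
      intro bs0 r0 hlen
      rw [List.foldl_cons]
      rcases hkey : ps.findIdx? (fun p => PySem.Int.mod plate p == 0) with _ | k
      · -- no prime divides: goes to rest
        have hall : ps.all (fun p => !dv p plate) = true := by
          rw [List.all_eq_true]
          intro p hp
          have := List.findIdx?_eq_none_iff.mp hkey p hp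
          simpa [dv] using this
        have : altClassify ps (bs0, r0) plate = (bs0, r0 ++ [plate]) := by
          simp [altClassify, hkey]
        rw [this, ih bs0 _ hlen]
        simp only [Prod.mk.injEq]
        constructor
        · congr 1
          apply List.map_congr_left
          intro k hk
          rw [List.filter_cons]
          simp [dv, hkey]
        · simp [remF, hall]
      · -- first dividing prime has index k
        have hk : k < ps.length := by
          have := List.findIdx?_eq_some_iff_findIdx_eq.mp hkey
          exact this.1
        have hnall : ps.all (fun p => !dv p plate) = false := by
          rcases (List.findIdx?_eq_some_iff_getElem.mp hkey) with ⟨h1, h2, _⟩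
          simp only [Bool.not_eq_true, List.all_eq_false]
          exact ⟨ps[k], List.getElem_mem _, by simp [dv, h2]⟩
        have : altClassify ps (bs0, r0) plate = (bs0.modify k (· ++ [plate]), r0) := by
          simp [altClassify, hkey]
        rw [this, ih _ _ (by simp [List.length_modify, hlen])]
        simp only [Prod.mk.injEq]
        constructor
        · apply List.ext_getElem
          · simp [List.length_modify, hlen]
          · intro i hi1 hi2
            have hips : i < ps.length := by
              simp [List.length_modify, hlen] at hi1 ⊢
              omega
            simp only [List.getElem_zipWith, List.getElem_map, List.getElem_range,
              List.getElem_modify]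
            rw [List.filter_cons]
            by_cases hik : k = i
            · subst hik
              simp [dv, hkey]
            · have hne : ¬(List.findIdx? (fun p => dv p plate) ps == some i) = true := by
                simp [dv, hkey]
                omega
              simp [hik, hne]
        · simp [remF, hnall]

-- index-based buckets = recursive buckets
lemma bktsIdx_eq (ps : List Int) : ∀ (A : List Int),
    (List.range ps.length).map
      (fun k => A.filter (fun x => ps.findIdx? (fun p => dv p x) == some k)) = bkts ps A := by
  induction ps with
  | nil => intro A; simp [bkts]
  | cons p ps ih =>
      intro A
      simp only [List.length_cons, List.range_succ_eq_map, List.map_cons, List.map_map, bkts,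
        List.cons.injEq]
      constructor
      · apply List.filter_congr
        intro x _
        simp [List.findIdx?_cons]
        by_cases h : dv p x
        · simp [h]
        · simp [h]
      · rw [← ih (A.filter (fun x => !dv p x))]
        apply List.map_congr_left
        intro k _
        simp only [Function.comp_apply, List.filter_filter]
        apply List.filter_congr
        intro x _
        simp [List.findIdx?_cons]
        by_cases h : dv p x
        · simp [h]
        · simp [h]

def emitB : List (List Int) → Nat → List Int
  | [], _ => []
  | b::bs, k => (if k % 2 == 0 then b else b.reverse) ++ emitB bs (k+1)

-- assembling with zipIdx
lemma assemble_acc (bs : List (List Int)) : ∀ (k0 : Nat) (out0 : List Int),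
    (bs.zipIdx k0).foldl altAssemble out0 = out0 ++ emitB bs k0 := by
  induction bs with
  | nil => intro k0 out0; simp [emitB]
  | cons b bs ih => intro k0 out0; simp [List.zipIdx_cons, altAssemble, emitB, ih]

-- the assembled buckets equal the parity-aware emission
lemma emitB_bkts (ps : List Int) : ∀ (A : List Int) (k : Nat),
    emitB (bkts ps A) k = emitP ps A (decide (k % 2 = 1)) := by
  induction ps with
  | nil => intro A k; simp [bkts, emitB, emitP]
  | cons p ps ih =>
      intro A k
      simp only [bkts, emitB, emitP, ih]
      congr 1
      · rcases Nat.mod_two_eq_zero_or_one k with h | h <;> simp [h]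
      · congr 1
        rcases Nat.mod_two_eq_zero_or_one k with h | h <;>
          simp [Nat.succ_mod_two_eq_one_iff, h]

lemma zipWith_empty_append (ps : List Int) (bs : List (List Int)) (h : bs.length = ps.length) :
    List.zipWith (· ++ ·) (ps.map (fun _ => ([] : List Int))) bs = bs := by
  apply List.ext_getElem <;> simp [h]

theorem waiter_eq_emit (number : List Int) (q : Int) :
    waiter number q = waiter_alt number q := by
  have hr := roundsA (genPrimes q) number [] false
  rw [show orient false number = number by simp [orient]] at hr
  have hc := classify_acc (genPrimes q) number
      ((genPrimes q).map (fun _ => ([] : List Int))) [] (by simp)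
  rw [zipWith_empty_append _ _ (by simp)] at hc
  rw [bktsIdx_eq] at hc
  simp only [waiter, waiter_alt, hr, hc]
  rw [assemble_acc, emitB_bkts]
  simp only [List.nil_append, orient_reverse]
  congr 1
  rcases Nat.mod_two_eq_zero_or_one (genPrimes q).length with h | h <;> simp [orient, h]

-- ===== VERDICT (by name: the statement is the Claim_ definition above) =====
theorem waiter_spec : Claim_equal_waiter := by
  intro number q _
  unfold Spec_waiter
  exact waiter_eq_emit number q
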